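-- pv_equiv track=rewrite | github.com/ngl4/formation_journey | AlgoMarathon/Arrays/PairLearning/cellTowerswJiyoon.py | search
-- ===== SOURCE A (Python) =====
-- def search(customers, towers):
--     closestTower = [0] * len(customers)
--     diff = float("inf")
--     largest = 0
--     smallest = 0
--     for i in range(len(customers)):
--         smallestDiff = float("inf")
--         for j in range(len(towers)):
--             largest = max(customers[i], towers[j])
--             smallest = min(customers[i], towers[j])
--             diff = largest - smallest
--             if diff < smallestDiff:
--                 smallestDiff = diff
--                 closestTower[i] = smallestDiff
--     return max(closestTower)
-- ===== SOURCE B (Python) =====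
-- def search(customers, towers):
--     ts = sorted(towers)
--     n = len(ts)
--     best = None
--     for c in customers:
--         lo, hi = 0, n
--         while lo < hi:
--             mid = (lo + hi) // 2
--             if ts[mid] < c:
--                 lo = mid + 1
--             else:
--                 hi = mid
--         if lo == 0:
--             d = ts[0] - c
--         elif lo == n:
--             d = c - ts[n - 1]
--         else:
--             d = min(ts[lo] - c, c - ts[lo - 1])
--         if best is None or d > best:
--             best = d
--     return best
-- ===== Notes on version B (the rewrite author's own statement) =====
-- stated objective: faster
-- what changed: Replaced the O(n*m) all-pairs double loop by sorting the towers once and binary-searching each customer's nearest tower.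
-- outside the precondition, e.g. on search([1], []): A returns 0, B raises IndexError; on search([], [1]): A raises ValueError, B returns None
import Mathlib
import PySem

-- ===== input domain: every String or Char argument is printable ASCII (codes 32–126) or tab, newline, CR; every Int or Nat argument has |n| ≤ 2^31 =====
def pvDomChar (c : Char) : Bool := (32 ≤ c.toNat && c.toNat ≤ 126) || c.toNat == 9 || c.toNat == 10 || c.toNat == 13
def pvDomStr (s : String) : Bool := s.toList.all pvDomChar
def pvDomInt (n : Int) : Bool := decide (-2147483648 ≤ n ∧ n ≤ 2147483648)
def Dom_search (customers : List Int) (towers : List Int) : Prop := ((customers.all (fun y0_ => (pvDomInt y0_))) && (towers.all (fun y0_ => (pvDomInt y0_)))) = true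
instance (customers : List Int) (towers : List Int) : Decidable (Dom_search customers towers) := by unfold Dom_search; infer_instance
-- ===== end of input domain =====

-- B sorts the towers once and binary-searches each customer's nearest tower instead of A's all-pairs double loop (faster: asymptotic, O((n+m) log m) vs O(n*m)).


-- ===== PORT A =====
-- inner loop state: (smallestDiff : Option Int with none = float("inf"), closestTower[i])
def search (customers : List Int) (towers : List Int) : Int :=
  let closestTower := customers.map (fun c =>
    (towers.foldl (fun (st : Option Int × Int) t =>
        let largest := max c t
        let smallest := min c t
        let diff := largest - smallest
        match st.1 with
        | none => (some diff, diff)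
        | some s => if diff < s then (some diff, diff) else st)
      (none, 0)).2)
  -- Python max(closestTower); raises on an empty list (excluded by Pre_search)
  (PySem.List.max? closestTower (fun x => x)).getD 0

-- ===== PORT B =====
-- while lo < hi: binary search of Source B; every ts index taken is in range (0 ≤ mid < hi ≤ len ts at each probe)
-- fuel = hi - lo bounds the iteration count (each step halves the interval); purely a totality guard
def pvBisGo (ts : List Int) (c : Int) : Nat → Nat → Nat → Nat
  | 0, lo, _hi => lo
  | Nat.succ k, lo, hi =>
    if lo < hi then
      let mid := (lo + hi) / 2
      if ts.getD mid 0 < c then pvBisGo ts c k (mid + 1) hi else pvBisGo ts c k lo mid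
    else lo

def pvBis (ts : List Int) (c : Int) (lo hi : Nat) : Nat := pvBisGo ts c (hi - lo) lo hi

def search_alt (customers : List Int) (towers : List Int) : Int :=
  let ts := PySem.List.sorted towers (fun x => x) false
  let n := ts.length
  let best := customers.foldl (fun (best : Option Int) c =>
    let lo := pvBis ts c 0 n
    let d :=
      if lo == 0 then ts.getD 0 0 - c           -- ts[0] in range under Pre_search (towers ≠ [])
      else if lo == n then c - ts.getD (n - 1) 0
      else min (ts.getD lo 0 - c) (c - ts.getD (lo - 1) 0)
    match best with
    | none => some d
    | some b => some (if d > b then d else b)) none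
  -- Python returns best (None only when customers = [], excluded by Pre_search)
  best.getD 0

-- ===== PRECONDITION & SPEC =====
-- Pre_ excludes customers = [] (A raises ValueError on max([])) and towers = [] (A returns 0, an
-- accidental leftover of the zero-initialised array, where B's binary search naturally raises IndexError).
def Pre_search (customers : List Int) (towers : List Int) : Prop := customers ≠ [] ∧ towers ≠ []
instance (customers : List Int) (towers : List Int) : Decidable (Pre_search customers towers) := by unfold Pre_search; infer_instance
def pvWitness_search : List Int × List Int := ([1, 8, 5], [3, 10])
def Spec_search (customers : List Int) (towers : List Int) (out : Int) : Prop := out = search_alt customers towers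
instance (customers : List Int) (towers : List Int) (out : Int) : Decidable (Spec_search customers towers out) := by unfold Spec_search; infer_instance

-- ===== CLAIM (what is proved, stated in full; the proofs are below) =====
def Claim_equal_search : Prop := ∀ (customers : List Int) (towers : List Int), Dom_search customers towers → Pre_search customers towers → Spec_search customers towers (search customers towers)

-- ===== LEMMAS AND PROOFS =====

-- distance |c - t| as A computes it
def pvDist (c t : Int) : Int := max c t - min c t

-- "v is the minimum distance from c to a tower of l"
def pvIsMin (c : Int) (l : List Int) (v : Int) : Prop :=
  (∃ t ∈ l, v = pvDist c t) ∧ ∀ t ∈ l, v ≤ pvDist c t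

-- A's inner fold, once the accumulator is (some s, s), is a running min
theorem foldA_min (c : Int) (l : List Int) (s : Int) :
    l.foldl (fun (st : Option Int × Int) t =>
        let largest := max c t
        let smallest := min c t
        let diff := largest - smallest
        match st.1 with
        | none => (some diff, diff)
        | some s => if diff < s then (some diff, diff) else st)
      (some s, s)
    = (some (l.foldl (fun a x => Min.min a (max c x - min c x)) s),
       l.foldl (fun a x => Min.min a (max c x - min c x)) s) := by
  induction l generalizing s with
  | nil => rfl
  | cons x l ih =>
      simp only [List.foldl_cons]
      by_cases h : max c x - min c x < s
      · rw [if_pos h, min_eq_right (le_of_lt h)]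
        exact ih _
      · rw [if_neg h, min_eq_left (le_of_not_gt h)]
        exact ih s

-- pvDist under a known order
theorem pvDist_of_le {c t : Int} (h : c ≤ t) : pvDist c t = t - c := by
  simp [pvDist, max_eq_right h, min_eq_left h]

theorem pvDist_of_ge {c t : Int} (h : t ≤ c) : pvDist c t = c - t := by
  simp [pvDist, max_eq_left h, min_eq_right h]

-- A's cell for customer c is the minimum distance
theorem cellA_isMin (c : Int) (t : Int) (rest : List Int) :
    pvIsMin c (t :: rest)
      (((t :: rest).foldl (fun (st : Option Int × Int) x =>
          let largest := max c x
          let smallest := min c x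
          let diff := largest - smallest
          match st.1 with
          | none => (some diff, diff)
          | some s => if diff < s then (some diff, diff) else st)
        (none, 0)).2) := by
  simp only [List.foldl_cons]
  rw [foldA_min]
  rw [show (fun (a : Int) (x : Int) => Min.min a (max c x - min c x))
        = (fun (a : Int) (x : Int) => Min.min a ((fun y => max c y - min c y) x)) from rfl,
      ← List.foldl_map]
  constructor
  · rcases PySem.List.foldl_min_mem (rest.map fun x => max c x - min c x) (max c t - min c t) with h1 | h1
    · exact ⟨t, List.mem_cons_self, by rw [h1]; rfl⟩
    · obtain ⟨x, hx, hfx⟩ := List.mem_map.1 h1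
      exact ⟨x, List.mem_cons_of_mem _ hx, by rw [← hfx]; rfl⟩
  · intro u hu
    rcases List.mem_cons.1 hu with rfl | hu
    · exact (PySem.List.foldl_min_le _ _).1
    · exact (PySem.List.foldl_min_le _ _).2 _ (List.mem_map_of_mem hu)

-- the binary-search invariant
theorem pvBis_spec (ts : List Int) (c : Int)
    (hsort : ∀ i j : Nat, i ≤ j → j < ts.length → ts.getD i 0 ≤ ts.getD j 0)
    (lo hi : Nat) :
    lo ≤ hi → hi ≤ ts.length →
    (∀ i, i < lo → ts.getD i 0 < c) → (∀ i, hi ≤ i → i < ts.length → c ≤ ts.getD i 0) →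
    pvBis ts c lo hi ≤ ts.length ∧
    (∀ i, i < pvBis ts c lo hi → ts.getD i 0 < c) ∧
    (∀ i, pvBis ts c lo hi ≤ i → i < ts.length → c ≤ ts.getD i 0) := by
  have go : ∀ (k lo hi : Nat), hi - lo ≤ k → lo ≤ hi → hi ≤ ts.length →
      (∀ i, i < lo → ts.getD i 0 < c) → (∀ i, hi ≤ i → i < ts.length → c ≤ ts.getD i 0) →
      pvBisGo ts c k lo hi ≤ ts.length ∧
      (∀ i, i < pvBisGo ts c k lo hi → ts.getD i 0 < c) ∧
      (∀ i, pvBisGo ts c k lo hi ≤ i → i < ts.length → c ≤ ts.getD i 0) := by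
    intro k
    induction k with
    | zero =>
        intro lo hi hk h1 h2 h3 h4
        have : lo = hi := by omega
        subst this
        exact ⟨h2, h3, h4⟩
    | succ k ih =>
        intro lo hi hk h1 h2 h3 h4
        by_cases hlt : lo < hi
        · simp only [pvBisGo, if_pos hlt]
          by_cases hcond : ts.getD ((lo + hi) / 2) 0 < c
          · rw [if_pos hcond]
            apply ih
            · omega
            · omega
            · omega
            · intro i hi'
              have hmlen : (lo + hi) / 2 < ts.length := by omega
              have := hsort i ((lo + hi) / 2) (by omega) hmlen
              omega
            · exact h4
          · rw [if_neg hcond]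
            apply ih
            · omega
            · omega
            · omega
            · exact h3
            · intro i hge hlen
              have := hsort ((lo + hi) / 2) i hge hlen
              omega
        · simp only [pvBisGo, if_neg hlt]
          have : lo = hi := by omega
          subst this
          exact ⟨h2, h3, h4⟩
  exact fun h1 h2 h3 h4 => go (hi - lo) lo hi (le_refl _) h1 h2 h3 h4

-- B's per-customer distance is the minimum distance
theorem dB_isMin (c : Int) (towers : List Int) (hne : towers ≠ []) :
    pvIsMin c towers
      (let ts := PySem.List.sorted towers (fun x => x) false
       let n := ts.length
       let lo := pvBis ts c 0 n
       if lo == 0 then ts.getD 0 0 - c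
       else if lo == n then c - ts.getD (n - 1) 0
       else min (ts.getD lo 0 - c) (c - ts.getD (lo - 1) 0)) := by
  set ts := PySem.List.sorted towers (fun x => x) false with hts
  have hperm : ts.Perm towers := PySem.List.sorted_perm towers (fun x => x) false
  have hmem : ∀ x, x ∈ ts ↔ x ∈ towers := fun x => hperm.mem_iff
  have htsne : ts ≠ [] := by
    intro h; exact hne (List.Perm.nil_eq (h ▸ hperm)).symm
  have hn : 0 < ts.length := List.length_pos_iff.mpr htsne
  have hpw : ts.Pairwise (fun a b => (fun x => x) a ≤ (fun x => x) b) :=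
    PySem.List.sorted_pairwise towers (fun x => x)
  have hsort : ∀ i j : Nat, i ≤ j → j < ts.length → ts.getD i 0 ≤ ts.getD j 0 := by
    intro i j hij hj
    rcases Nat.eq_or_lt_of_le hij with rfl | hlt
    · exact le_refl _
    · rw [List.getD_eq_getElem ts 0 (by omega), List.getD_eq_getElem ts 0 hj]
      exact (List.pairwise_iff_getElem.1 hpw) i j (by omega) hj hlt
  -- an element of ts by index, as a member of towers
  have hidx : ∀ i : Nat, i < ts.length → ts.getD i 0 ∈ towers := by
    intro i hi
    rw [List.getD_eq_getElem ts 0 hi]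
    exact (hmem _).1 (ts.getElem_mem hi)
  -- every member of towers has an index in ts
  have hmem' : ∀ u ∈ towers, ∃ i : Nat, i < ts.length ∧ ts.getD i 0 = u := by
    intro u hu
    obtain ⟨i, hi, hiu⟩ := List.mem_iff_getElem.1 ((hmem u).2 hu)
    exact ⟨i, hi, by rw [List.getD_eq_getElem ts 0 hi, hiu]⟩
  obtain ⟨hr1, hr2, hr3⟩ := pvBis_spec ts c hsort 0 ts.length (by omega) (le_refl _)
    (by omega) (by omega)
  set r := pvBis ts c 0 ts.length with hr
  simp only
  rw [← hr]
  by_cases h0 : r = 0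
  · simp only [h0, beq_self_eq_true, if_true]
    have hc0 : c ≤ ts.getD 0 0 := hr3 0 (by omega) hn
    constructor
    · exact ⟨ts.getD 0 0, hidx 0 hn, by rw [pvDist_of_le hc0]⟩
    · intro u hu
      obtain ⟨i, hi, hiu⟩ := hmem' u hu
      have hcu : c ≤ u := hiu ▸ hr3 i (by omega) hi
      have h0u : ts.getD 0 0 ≤ u := hiu ▸ hsort 0 i (by omega) hi
      rw [pvDist_of_le hcu]; omega
  · by_cases hN : r = ts.length
    · have hne0 : (r == 0) = false := by simp [h0]
      have hlen0 : (ts.length == 0) = false := by simp; omega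
      simp only [hlen0, Bool.false_eq_true, if_false, hN, beq_self_eq_true, if_true]
      have hlast : ts.getD (ts.length - 1) 0 < c := hr2 (ts.length - 1) (by omega)
      constructor
      · exact ⟨ts.getD (ts.length - 1) 0, hidx _ (by omega),
          by rw [pvDist_of_ge (le_of_lt hlast)]⟩
      · intro u hu
        obtain ⟨i, hi, hiu⟩ := hmem' u hu
        have hcu : u < c := hiu ▸ hr2 i (by omega)
        have hui : u ≤ ts.getD (ts.length - 1) 0 := hiu ▸ hsort i (ts.length - 1) (by omega) (by omega)
        rw [pvDist_of_ge (le_of_lt hcu)]; omega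
    · have hne0 : (r == 0) = false := by simp [h0]
      have hneN : (r == ts.length) = false := by simp [hN]
      simp only [hne0, hneN, Bool.false_eq_true, if_false]
      have hrlen : r < ts.length := by omega
      have hcr : c ≤ ts.getD r 0 := hr3 r (le_refl _) hrlen
      have hrc : ts.getD (r - 1) 0 < c := hr2 (r - 1) (by omega)
      constructor
      · rcases min_cases (ts.getD r 0 - c) (c - ts.getD (r - 1) 0) with ⟨hmin, _⟩ | ⟨hmin, _⟩
        · exact ⟨ts.getD r 0, hidx r hrlen, by rw [pvDist_of_le hcr, hmin]⟩
        · exact ⟨ts.getD (r - 1) 0, hidx _ (by omega),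
            by rw [pvDist_of_ge (le_of_lt hrc), hmin]⟩
      · intro u hu
        obtain ⟨i, hi, hiu⟩ := hmem' u hu
        by_cases hir : i < r
        · have hcu : u < c := hiu ▸ hr2 i hir
          have hui : u ≤ ts.getD (r - 1) 0 := hiu ▸ hsort i (r - 1) (by omega) (by omega)
          rw [pvDist_of_ge (le_of_lt hcu)]
          have := min_le_right (ts.getD r 0 - c) (c - ts.getD (r - 1) 0)
          omega
        · have hcu : c ≤ u := hiu ▸ hr3 i (by omega) hi
          have hui : ts.getD r 0 ≤ u := hiu ▸ hsort r i (by omega) hi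
          rw [pvDist_of_le hcu]
          have := min_le_left (ts.getD r 0 - c) (c - ts.getD (r - 1) 0)
          omega

theorem pvIsMin_unique {c : Int} {l : List Int} {v w : Int}
    (hv : pvIsMin c l v) (hw : pvIsMin c l w) : v = w := by
  obtain ⟨⟨t, ht, hvt⟩, hvle⟩ := hv
  obtain ⟨⟨u, hu, hwu⟩, hwle⟩ := hw
  have h1 : v ≤ w := by rw [hwu]; exact hvle u hu
  have h2 : w ≤ v := by rw [hvt]; exact hwle t ht
  omega

-- B's outer loop is a running max of the per-customer distances
theorem foldB (dB : Int → Int) (l : List Int) (b : Int) :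
    l.foldl (fun (best : Option Int) c =>
      match best with
      | none => some (dB c)
      | some b => some (if dB c > b then dB c else b)) (some b)
    = some (l.foldl (fun a x => Max.max a (dB x)) b) := by
  induction l generalizing b with
  | nil => rfl
  | cons x l ih =>
      simp only [List.foldl_cons]
      rw [show (if dB x > b then dB x else b) = Max.max b (dB x) from by
        rcases le_or_gt (dB x) b with h | h
        · simp [not_lt.2 h, max_eq_left h]
        · simp [h, max_eq_right (le_of_lt h)]]
      exact ih _

-- proof-only views of the two per-customer computations
def cellA (towers : List Int) (c : Int) : Int :=
  (towers.foldl (fun (st : Option Int × Int) t =>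
    let largest := max c t
    let smallest := min c t
    let diff := largest - smallest
    match st.1 with
    | none => (some diff, diff)
    | some s => if diff < s then (some diff, diff) else st) (none, 0)).2

def dBv (towers : List Int) (c : Int) : Int :=
  let ts := PySem.List.sorted towers (fun x => x) false
  let n := ts.length
  let lo := pvBis ts c 0 n
  if lo == 0 then ts.getD 0 0 - c
  else if lo == n then c - ts.getD (n - 1) 0
  else min (ts.getD lo 0 - c) (c - ts.getD (lo - 1) 0)

theorem searchA_eq (c0 : Int) (cs : List Int) (towers : List Int) :
    search (c0 :: cs) towers
      = cs.foldl (fun a x => Max.max a (cellA towers x)) (cellA towers c0) := by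
  have h : search (c0 :: cs) towers
      = (PySem.List.max? ((c0 :: cs).map (cellA towers)) (fun x => x)).getD 0 := rfl
  rw [h, List.map_cons, PySem.List.max?_id_cons, Option.getD_some, List.foldl_map]

theorem searchB_eq (c0 : Int) (cs : List Int) (towers : List Int) :
    search_alt (c0 :: cs) towers
      = cs.foldl (fun a x => Max.max a (dBv towers x)) (dBv towers c0) := by
  have h : search_alt (c0 :: cs) towers
      = (((c0 :: cs)).foldl (fun (best : Option Int) c =>
          match best with
          | none => some (dBv towers c)
          | some b => some (if dBv towers c > b then dBv towers c else b)) none).getD 0 := rfl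
  rw [h, List.foldl_cons]
  rw [show (match (none : Option Int) with
          | none => some (dBv towers c0)
          | some b => some (if dBv towers c0 > b then dBv towers c0 else b))
        = some (dBv towers c0) from rfl]
  rw [foldB]
  rfl

-- ===== VERDICT (by name: the statement is the Claim_ definition above) =====
theorem search_spec : Claim_equal_search := by
  intro customers towers _ hpre
  obtain ⟨hc, ht⟩ := hpre
  rcases customers with _ | ⟨c0, cs⟩
  · exact absurd rfl hc
  rcases towers with _ | ⟨t0, rest⟩
  · exact absurd rfl ht
  have hcell : ∀ c : Int, cellA (t0 :: rest) c = dBv (t0 :: rest) c := fun c =>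
    pvIsMin_unique (cellA_isMin c t0 rest) (dB_isMin c (t0 :: rest) (by simp))
  unfold Spec_search
  rw [searchA_eq, searchB_eq, hcell c0]
  apply PySem.List.foldl_congr_mem
  intro acc x _
  rw [hcell x]
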